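-- pv_equiv track=rewrite | github.com/Aasthaengg/IBMdataset | Python_codes/p02686/s898500688.py | f
-- ===== SOURCE A (Python) =====
-- def f(s):
--   m=0
--   n=0
--   for i in s:
--     if i==")":n-=1
--     else:n+=1
--     m=min(m,n)
--   return [m,n]
-- ===== SOURCE B (Python) =====
-- def f(s):
--     # divide and conquer: (min_prefix, total) combine as a monoid over concatenation
--     def solve(t):
--         if len(t) <= 1:
--             if not t:
--                 return (0, 0)
--             d = -1 if t == ")" else 1
--             return (min(0, d), d)
--         k = len(t) // 2
--         m1, t1 = solve(t[:k])
--         m2, t2 = solve(t[k:])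
--         return (min(m1, t1 + m2), t1 + t2)
--     m, n = solve(s)
--     return [m, n]
-- ===== Notes on version B (the rewrite author's own statement) =====
-- stated objective: alternative
-- what changed: B replaces A's single left-to-right scan by a divide-and-conquer recursion: it splits the string in half, computes (min prefix balance, total balance) for each half, and merges them with the monoid rule (min(m1, t1+m2), t1+t2).
import Mathlib
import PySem

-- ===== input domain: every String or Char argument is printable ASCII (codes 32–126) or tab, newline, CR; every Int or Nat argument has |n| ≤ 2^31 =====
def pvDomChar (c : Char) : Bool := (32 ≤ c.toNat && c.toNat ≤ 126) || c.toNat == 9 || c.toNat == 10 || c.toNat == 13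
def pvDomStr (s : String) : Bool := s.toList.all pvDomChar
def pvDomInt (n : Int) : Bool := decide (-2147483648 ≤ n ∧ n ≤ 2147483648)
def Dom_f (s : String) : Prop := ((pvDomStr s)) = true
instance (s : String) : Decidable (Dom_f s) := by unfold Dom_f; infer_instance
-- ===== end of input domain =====

-- B replaces A's single scan by a divide-and-conquer recursion merging (min prefix, total) of the halves; same O(n) cost, alternative algorithm.

-- ===== PORT A =====
-- for i in s: n -= 1 if i == ")" else n += 1; m = min(m, n); return [m, n]
def f (s : String) : List Int :=
  let st := s.toList.foldl (fun (mn : Int × Int) i =>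
    let n := if i = ')' then mn.2 - 1 else mn.2 + 1
    (min mn.1 n, n)) (0, 0)
  [st.1, st.2]

-- ===== PORT B =====
-- solve(t): empty/one-char base cases, else split at len//2 and merge (min(m1, t1+m2), t1+t2).
def fAltSolve : List Char → Int × Int
  | [] => (0, 0)
  | [c] =>
    let d : Int := if c = ')' then -1 else 1
    (min 0 d, d)
  | a :: b :: r =>
    let t := a :: b :: r
    let k := t.length / 2
    let r1 := fAltSolve (t.take k)
    let r2 := fAltSolve (t.drop k)
    (min r1.1 (r1.2 + r2.1), r1.2 + r2.2)
termination_by t => t.length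
decreasing_by
  all_goals simp [List.length_take, List.length_drop]
  all_goals omega

def f_alt (s : String) : List Int :=
  let r := fAltSolve s.toList
  [r.1, r.2]

-- ===== PRECONDITION & SPEC =====
def Spec_f (s : String) (out : List Int) : Prop := out = f_alt s
instance (s : String) (out : List Int) : Decidable (Spec_f s out) := by unfold Spec_f; infer_instance

-- ===== CLAIM (what is proved, stated in full; the proofs are below) =====
def Claim_equal_f : Prop := ∀ (s : String), Dom_f s → Spec_f s (f s)

-- ===== LEMMAS AND PROOFS =====

-- A's loop body
def aStep (mn : Int × Int) (i : Char) : Int × Int :=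
  let n := if i = ')' then mn.2 - 1 else mn.2 + 1
  (min mn.1 n, n)

def G (l : List Char) : Int × Int := l.foldl aStep (0, 0)

theorem aStep_eq (m n : Int) (c : Char) :
    aStep (m, n) c = (min m (n + (if c = ')' then (-1 : Int) else 1)),
      n + (if c = ')' then (-1 : Int) else 1)) := by
  simp only [aStep]
  split <;> (rw [Prod.mk.injEq]; constructor <;> omega)

-- A's scan started at (m, n) with m ≤ n factors through G of the suffix.
theorem foldl_aStep_from (l : List Char) : ∀ m n : Int, m ≤ n →
    l.foldl aStep (m, n) = (min m (n + (G l).1), n + (G l).2) := by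
  induction l with
  | nil => intro m n h; simp [G]; omega
  | cons c t ih =>
    intro m n h
    set d : Int := if c = ')' then (-1 : Int) else 1 with hdef
    have hG : G (c :: t) = (min (min 0 d) (d + (G t).1), d + (G t).2) := by
      simp only [G, List.foldl_cons, aStep_eq, ← hdef, Int.zero_add]
      exact ih (min 0 d) d (by omega)
    simp only [List.foldl_cons, aStep_eq, ← hdef, hG]
    rw [ih (min m (n + d)) (n + d) (by omega)]
    rw [Prod.mk.injEq]; constructor <;> omega

theorem foldl_aStep_le (l : List Char) : ∀ m n : Int, m ≤ n →
    (l.foldl aStep (m, n)).1 ≤ (l.foldl aStep (m, n)).2 := by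
  induction l with
  | nil => intro m n h; simpa
  | cons c t ih =>
    intro m n h
    simp only [List.foldl_cons, aStep_eq]
    exact ih _ _ (by omega)

-- A's result on a concatenation merges like B's combine rule.
theorem G_append (a b : List Char) :
    G (a ++ b) = (min (G a).1 ((G a).2 + (G b).1), (G a).2 + (G b).2) := by
  have hle : (G a).1 ≤ (G a).2 := foldl_aStep_le a 0 0 le_rfl
  have h := foldl_aStep_from b (G a).1 (G a).2 hle
  calc G (a ++ b) = b.foldl aStep (G a) := by simp [G, List.foldl_append]
    _ = _ := by rw [← h]

theorem fAltSolve_eq_G (l : List Char) : fAltSolve l = G l := by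
  induction l using fAltSolve.induct with
  | case1 => simp [fAltSolve, G]
  | case2 c =>
    simp only [fAltSolve, G, List.foldl_cons, List.foldl_nil, aStep_eq]
    rw [Prod.mk.injEq]; constructor <;> omega
  | case3 a b r t k ih1 ih2 =>
    rw [fAltSolve]
    simp only [t, k] at ih1 ih2 ⊢
    rw [ih1, ih2]
    have h := G_append ((a :: b :: r).take ((a :: b :: r).length / 2))
      ((a :: b :: r).drop ((a :: b :: r).length / 2))
    rw [List.take_append_drop] at h
    rw [h]

-- ===== VERDICT (by name: the statement is the Claim_ definition above) =====
theorem f_spec : Claim_equal_f := by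
  intro s _
  unfold Spec_f f f_alt
  rw [fAltSolve_eq_G]
  rfl
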